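-- pv_equiv track=rewrite | github.com/delton137/simple_ehr_transformer | export_vocabulary.py | group_vocabulary
-- ===== SOURCE A (Python) =====
-- from collections import defaultdict, Counter
-- from typing import Dict, List, Tuple
--
-- CATEGORIES = [
--     'EVENT_', 'AGE_', 'TIME_', 'Q', 'GENDER_', 'RACE_', 'YEAR_', 'VISIT_TYPE_', 'UNIT_',
--     'CONDITION_', 'DRUG_', 'PROCEDURE_', 'MEASUREMENT_', 'OBSERVATION_'
-- ]
--
-- def group_vocabulary(vocab: Dict[str, int]) -> Dict[str, List[Tuple[str, int]]]:
--     grouped = defaultdict(list)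
--     for token, tok_id in vocab.items():
--         matched = False
--         for cat in CATEGORIES:
--             if token.startswith(cat):
--                 grouped[cat].append((token, tok_id))
--                 matched = True
--                 break
--         if not matched:
--             grouped['OTHER'].append((token, tok_id))
--     # sort by token_id within each group
--     for k in grouped:
--         grouped[k].sort(key=lambda x: x[1])
--     return grouped
-- ===== SOURCE B (Python) =====
-- CATEGORIES = [
--     'EVENT_', 'AGE_', 'TIME_', 'Q', 'GENDER_', 'RACE_', 'YEAR_', 'VISIT_TYPE_', 'UNIT_',
--     'CONDITION_', 'DRUG_', 'PROCEDURE_', 'MEASUREMENT_', 'OBSERVATION_'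
-- ]
--
-- def group_vocabulary(vocab):
--     def category(token):
--         for cat in CATEGORIES:
--             if token.startswith(cat):
--                 return cat
--         return 'OTHER'
--     # keys in first-appearance order (same order A creates them)
--     grouped = {}
--     for token in vocab:
--         grouped.setdefault(category(token), [])
--     # one global stable sort by id replaces A's per-group sorts
--     for token, tok_id in sorted(vocab.items(), key=lambda x: x[1]):
--         grouped[category(token)].append((token, tok_id))
--     return grouped
-- ===== Notes on version B (the rewrite author's own statement) =====
-- stated objective: alternative
-- what changed: Instead of bucketing tokens in dict order and then sorting each of the (up to 15) groups by id, B performs one global stable sort of the items by id and distributes them into pre-created buckets in a single pass (stability makes each bucket come out already in A's order, ties included).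
import Mathlib
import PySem

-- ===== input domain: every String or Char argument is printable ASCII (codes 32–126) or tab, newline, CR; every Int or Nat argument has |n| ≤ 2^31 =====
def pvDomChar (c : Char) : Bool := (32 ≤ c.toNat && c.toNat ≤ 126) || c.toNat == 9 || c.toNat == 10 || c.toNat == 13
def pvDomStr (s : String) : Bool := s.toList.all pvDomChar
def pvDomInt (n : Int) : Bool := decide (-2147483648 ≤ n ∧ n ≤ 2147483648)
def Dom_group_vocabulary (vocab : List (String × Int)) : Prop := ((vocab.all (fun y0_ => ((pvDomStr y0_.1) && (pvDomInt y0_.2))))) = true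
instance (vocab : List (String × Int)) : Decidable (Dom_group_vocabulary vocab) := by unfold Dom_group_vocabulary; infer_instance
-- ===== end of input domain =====

-- B: one global stable sort by id plus a single distribution pass, instead of A's bucket-then-sort-each-group passes (alternative structure, same cost); equal output including key order.

def pvCATEGORIES : List String :=
  ["EVENT_", "AGE_", "TIME_", "Q", "GENDER_", "RACE_", "YEAR_", "VISIT_TYPE_", "UNIT_",
   "CONDITION_", "DRUG_", "PROCEDURE_", "MEASUREMENT_", "OBSERVATION_"]

-- ===== PORT A =====
-- 'vocab' is a Python dict: its items are those of PySem.Dict.ofList vocab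
def group_vocabulary (vocab : List (String × Int)) : List (String × List (String × Int)) :=
  let grouped0 : PySem.Dict String (List (String × Int)) :=
    (PySem.Dict.ofList vocab).items.foldl (fun grouped ti =>
      -- for cat in CATEGORIES: if token.startswith(cat): append; matched = True; break
      let r := pvCATEGORIES.foldl
        (fun (st : PySem.Dict String (List (String × Int)) × Bool) cat =>
          if st.2 then st
          else if PySem.Str.startswith ti.1 cat then
            (st.1.modify cat [] (fun l => l ++ [ti]), true)
          else st) (grouped, false)
      if r.2 then r.1 else r.1.modify "OTHER" [] (fun l => l ++ [ti]))
      PySem.Dict.empty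
  -- for k in grouped: grouped[k].sort(key=lambda x: x[1])
  let grouped1 := grouped0.keys.foldl
    (fun g k => g.modify k [] (fun l => PySem.List.sorted l (fun x => x.2) false)) grouped0
  grouped1.items

-- ===== PORT B =====
-- helper 'category(token)': first matching prefix, else 'OTHER'
def pvCategory (token : String) : String :=
  match pvCATEGORIES.find? (fun cat => PySem.Str.startswith token cat) with
  | some cat => cat
  | none => "OTHER"

def group_vocabulary_alt (vocab : List (String × Int)) : List (String × List (String × Int)) :=
  let items := (PySem.Dict.ofList vocab).items
  -- keys in first-appearance order
  let g1 := items.foldl (fun g ti => g.setdefault (pvCategory ti.1) []) PySem.Dict.empty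
  -- one global stable sort by id, then a single distribution pass
  let g2 := (PySem.List.sorted items (fun x => x.2) false).foldl
    (fun g ti => g.modify (pvCategory ti.1) [] (fun l => l ++ [ti])) g1
  g2.items

-- ===== PRECONDITION & SPEC =====
def Spec_group_vocabulary (vocab : List (String × Int)) (out : List (String × List (String × Int))) : Prop := out = group_vocabulary_alt vocab
instance (vocab : List (String × Int)) (out : List (String × List (String × Int))) : Decidable (Spec_group_vocabulary vocab out) := by unfold Spec_group_vocabulary; infer_instance

-- ===== CLAIM (what is proved, stated in full; the proofs are below) =====
def Claim_equal_group_vocabulary : Prop := ∀ (vocab : List (String × Int)), Dom_group_vocabulary vocab → Spec_group_vocabulary vocab (group_vocabulary vocab)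

-- ===== LEMMAS AND PROOFS =====

-- proof-side abbreviations
def pvKeys (xs : List (String × Int)) : List String :=
  PySem.Set.ofList (xs.map (fun ti => pvCategory ti.1))

def pvBucket (xs : List (String × Int)) (k : String) : List (String × Int) :=
  xs.filter (fun ti => pvCategory ti.1 == k)

def pvAssoc (xs : List (String × Int)) : List (String × List (String × Int)) :=
  (pvKeys xs).map (fun k => (k, pvBucket xs k))

-- generic dict-on-a-mapped-list facts
theorem pv_get?_mapped (ks : List String) (v : String → List (String × Int)) (k0 : String) :
    PySem.Dict.get? ⟨ks.map (fun k => (k, v k))⟩ k0 = if k0 ∈ ks then some (v k0) else none := by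
  induction ks with
  | nil => simp [PySem.Dict.get?]
  | cons k rest ih =>
    by_cases h : k = k0
    · subst h
      simp only [PySem.Dict.get?, List.map_cons]
      rw [List.find?_cons_of_pos (by simp)]
      simp
    · simp only [PySem.Dict.get?, List.map_cons] at ih ⊢
      rw [List.find?_cons_of_neg (by simp [h])]
      rw [ih]
      simp [List.mem_cons, Ne.symm h]

theorem pv_contains_mapped (ks : List String) (v : String → List (String × Int)) (k0 : String) :
    PySem.Dict.contains ⟨ks.map (fun k => (k, v k))⟩ k0 = decide (k0 ∈ ks) := by
  simp only [PySem.Dict.contains, List.any_map]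
  by_cases h : k0 ∈ ks
  · simp only [h, decide_true]
    rw [List.any_eq_true]
    exact ⟨k0, h, by simp⟩
  · simp only [h, decide_false]
    rw [List.any_eq_false]
    intro x hx
    simp only [Function.comp_apply, beq_iff_eq]
    exact fun e => h (e ▸ hx)

theorem pv_modify_mapped_mem (ks : List String) (v : String → List (String × Int)) (k0 : String)
    (f : List (String × Int) → List (String × Int)) (h : k0 ∈ ks) :
    PySem.Dict.modify ⟨ks.map (fun k => (k, v k))⟩ k0 [] f
      = ⟨ks.map (fun k => (k, if k = k0 then f (v k0) else v k))⟩ := by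
  unfold PySem.Dict.modify PySem.Dict.getD
  rw [pv_get?_mapped, if_pos h, Option.getD_some]
  unfold PySem.Dict.insert
  rw [pv_contains_mapped]
  simp only [h, decide_true, if_true]
  congr 1
  rw [List.map_map]
  apply List.map_congr_left
  intro k _
  by_cases hk : k = k0 <;> simp [hk]

theorem pv_modify_mapped_not_mem (ks : List String) (v : String → List (String × Int)) (k0 : String)
    (f : List (String × Int) → List (String × Int)) (h : k0 ∉ ks) :
    PySem.Dict.modify ⟨ks.map (fun k => (k, v k))⟩ k0 [] f
      = ⟨ks.map (fun k => (k, v k)) ++ [(k0, f [])]⟩ := by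
  unfold PySem.Dict.modify PySem.Dict.getD
  rw [pv_get?_mapped, if_neg h, Option.getD_none]
  unfold PySem.Dict.insert
  rw [pv_contains_mapped]
  simp only [h, decide_false, Bool.false_eq_true, if_false]

theorem pv_setdefault_mapped (ks : List String) (v : String → List (String × Int)) (k0 : String) :
    PySem.Dict.setdefault ⟨ks.map (fun k => (k, v k))⟩ k0 []
      = if k0 ∈ ks then ⟨ks.map (fun k => (k, v k))⟩ else ⟨ks.map (fun k => (k, v k)) ++ [(k0, [])]⟩ := by
  unfold PySem.Dict.setdefault
  rw [pv_contains_mapped]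
  by_cases h : k0 ∈ ks <;> simp [h]

-- pvKeys / pvBucket step facts
theorem pv_keys_append (xs : List (String × Int)) (ti : String × Int) :
    pvKeys (xs ++ [ti]) = if pvCategory ti.1 ∈ pvKeys xs then pvKeys xs else pvKeys xs ++ [pvCategory ti.1] := by
  unfold pvKeys
  rw [List.map_append, List.map_singleton, PySem.Set.ofList_append_singleton]
  simp only [PySem.Set.add, PySem.Set.contains]
  by_cases h : pvCategory ti.1 ∈ PySem.Set.ofList (xs.map fun ti => pvCategory ti.1) <;>
    simp [List.contains_iff_mem, h]

theorem pv_bucket_append (xs : List (String × Int)) (ti : String × Int) (k : String) :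
    pvBucket (xs ++ [ti]) k = pvBucket xs k ++ (if pvCategory ti.1 = k then [ti] else []) := by
  unfold pvBucket
  rw [List.filter_append]
  by_cases h : pvCategory ti.1 = k <;> simp [h]

theorem pv_bucket_not_mem (xs : List (String × Int)) (k : String) (h : k ∉ pvKeys xs) :
    pvBucket xs k = [] := by
  unfold pvKeys at h
  rw [PySem.Set.mem_ofList] at h
  unfold pvBucket
  rw [List.filter_eq_nil_iff]
  intro ti hti
  simp only [beq_iff_eq]
  intro e
  exact h (e ▸ List.mem_map_of_mem hti)

-- A's per-item step on the spec-shaped dict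
theorem pv_stepA (xs : List (String × Int)) (ti : String × Int) :
    PySem.Dict.modify ⟨pvAssoc xs⟩ (pvCategory ti.1) [] (fun l => l ++ [ti]) = ⟨pvAssoc (xs ++ [ti])⟩ := by
  by_cases h : pvCategory ti.1 ∈ pvKeys xs
  · rw [pvAssoc, pv_modify_mapped_mem _ _ _ _ h]
    unfold pvAssoc
    rw [pv_keys_append, if_pos h]
    congr 1
    apply List.map_congr_left
    intro k hk
    by_cases e : k = pvCategory ti.1
    · subst e; simp [pv_bucket_append]
    · have e' : ¬ pvCategory ti.1 = k := fun h' => e h'.symm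
      rw [pv_bucket_append, if_neg e']
      simp [e]
  · rw [pvAssoc, pv_modify_mapped_not_mem _ _ _ _ h]
    unfold pvAssoc
    rw [pv_keys_append, if_neg h, List.map_append, List.map_singleton]
    congr 1
    congr 1
    · apply List.map_congr_left
      intro k hk
      have e' : ¬ pvCategory ti.1 = k := fun e => h (e ▸ hk)
      rw [pv_bucket_append, if_neg e']
      simp
    · rw [pv_bucket_append, pv_bucket_not_mem xs _ h, if_pos rfl]

-- the inner category loop of A is 'modify at pvCategory'
theorem pv_loop_stuck (cs : List String) (ti : String × Int)
    (st : PySem.Dict String (List (String × Int)) × Bool) (h : st.2 = true) :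
    cs.foldl (fun st cat =>
        if st.2 then st
        else if PySem.Str.startswith ti.1 cat then (st.1.modify cat [] (fun l => l ++ [ti]), true)
        else st) st = st := by
  induction cs with
  | nil => rfl
  | cons c rest ih => simp [List.foldl_cons, h]; exact ih

theorem pv_loop_find (cs : List String) (g : PySem.Dict String (List (String × Int))) (ti : String × Int) :
    cs.foldl (fun st cat =>
        if st.2 then st
        else if PySem.Str.startswith ti.1 cat then (st.1.modify cat [] (fun l => l ++ [ti]), true)
        else st) (g, false)
      = match cs.find? (fun cat => PySem.Str.startswith ti.1 cat) with
        | some c => (g.modify c [] (fun l => l ++ [ti]), true)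
        | none => (g, false) := by
  induction cs generalizing g with
  | nil => rfl
  | cons c rest ih =>
    by_cases h : PySem.Str.startswith ti.1 c
    · simp only [List.foldl_cons, List.find?_cons, h, if_true, if_false, Bool.false_eq_true]
      exact pv_loop_stuck rest ti _ rfl
    · simp only [List.foldl_cons, List.find?_cons, h, Bool.false_eq_true, if_false]
      exact ih g

theorem pv_inner_loop (g : PySem.Dict String (List (String × Int))) (ti : String × Int) :
    (let r := pvCATEGORIES.foldl
        (fun (st : PySem.Dict String (List (String × Int)) × Bool) cat =>
          if st.2 then st
          else if PySem.Str.startswith ti.1 cat then (st.1.modify cat [] (fun l => l ++ [ti]), true)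
          else st) (g, false)
      if r.2 then r.1 else r.1.modify "OTHER" [] (fun l => l ++ [ti]))
      = g.modify (pvCategory ti.1) [] (fun l => l ++ [ti]) := by
  rw [pv_loop_find]
  unfold pvCategory
  cases h : pvCATEGORIES.find? (fun cat => PySem.Str.startswith ti.1 cat) <;> simp [h]

-- A's first fold builds the buckets, keys in first-appearance order
theorem pv_foldA (ds : List (String × Int)) : ∀ pre,
    ds.foldl (fun g ti => PySem.Dict.modify g (pvCategory ti.1) [] (fun l => l ++ [ti])) ⟨pvAssoc pre⟩
      = ⟨pvAssoc (pre ++ ds)⟩ := by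
  induction ds with
  | nil => intro pre; simp
  | cons ti rest ih =>
    intro pre
    rw [List.foldl_cons, pv_stepA, ih (pre ++ [ti]), List.append_assoc]
    rfl

-- B's first fold collects the keys, same order
theorem pv_foldB1 (ds : List (String × Int)) : ∀ pre,
    ds.foldl (fun g ti => PySem.Dict.setdefault g (pvCategory ti.1) [])
        ⟨(pvKeys pre).map (fun k => (k, ([] : List (String × Int))))⟩
      = ⟨(pvKeys (pre ++ ds)).map (fun k => (k, ([] : List (String × Int))))⟩ := by
  induction ds with
  | nil => intro pre; simp
  | cons ti rest ih =>
    intro pre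
    rw [List.foldl_cons, pv_setdefault_mapped]
    have step : (if pvCategory ti.1 ∈ pvKeys pre
        then (⟨(pvKeys pre).map (fun k => (k, ([] : List (String × Int))))⟩ : PySem.Dict String (List (String × Int)))
        else ⟨(pvKeys pre).map (fun k => (k, ([] : List (String × Int)))) ++ [(pvCategory ti.1, [])]⟩)
        = ⟨(pvKeys (pre ++ [ti])).map (fun k => (k, ([] : List (String × Int))))⟩ := by
      rw [pv_keys_append]
      by_cases h : pvCategory ti.1 ∈ pvKeys pre <;> simp [h]
    rw [step, ih (pre ++ [ti]), List.append_assoc]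
    rfl

-- B's second fold fills the buckets in traversal order
theorem pv_foldB2 (ys : List (String × Int)) : ∀ (KS : List String) (v : String → List (String × Int)),
    (∀ ti ∈ ys, pvCategory ti.1 ∈ KS) →
    ys.foldl (fun g ti => PySem.Dict.modify g (pvCategory ti.1) [] (fun l => l ++ [ti]))
        ⟨KS.map (fun k => (k, v k))⟩
      = ⟨KS.map (fun k => (k, v k ++ ys.filter (fun ti => pvCategory ti.1 == k)))⟩ := by
  induction ys with
  | nil => intro KS v _; simp
  | cons ti rest ih =>
    intro KS v hmem
    rw [List.foldl_cons, pv_modify_mapped_mem _ _ _ _ (hmem ti (List.mem_cons_self ..))]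
    rw [ih KS _ (fun x hx => hmem x (List.mem_cons_of_mem _ hx))]
    congr 1
    apply List.map_congr_left
    intro k hk
    by_cases e : pvCategory ti.1 = k
    · subst e; simp [List.filter_cons]
    · have e' : ¬ k = pvCategory ti.1 := fun h' => e h'.symm
      simp [List.filter_cons, e, e']

-- A's final pass: sort each bucket
theorem pv_foldSort (ks : List String) : ∀ (KS : List String) (v : String → List (String × Int)),
    ks.Nodup → (∀ k ∈ ks, k ∈ KS) →
    ks.foldl (fun g k => PySem.Dict.modify g k [] (fun l => PySem.List.sorted l (fun x => x.2) false))
        ⟨KS.map (fun k => (k, v k))⟩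
      = ⟨KS.map (fun k => (k, if k ∈ ks then PySem.List.sorted (v k) (fun x => x.2) false else v k))⟩ := by
  induction ks with
  | nil => intro KS v _ _; simp
  | cons k1 rest ih =>
    intro KS v hnd hmem
    rw [List.foldl_cons, pv_modify_mapped_mem _ _ _ _ (hmem k1 (List.mem_cons_self ..))]
    rw [ih KS _ (List.nodup_cons.mp hnd).2 (fun x hx => hmem x (List.mem_cons_of_mem _ hx))]
    congr 1
    apply List.map_congr_left
    intro k hk
    have hk1 : k1 ∉ rest := (List.nodup_cons.mp hnd).1
    by_cases e : k = k1
    · subst e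
      simp [hk1]
    · by_cases hr : k ∈ rest <;> simp [e, hr]

-- stable sort commutes with filter
theorem pv_insertBy_all_lt (x : String × Int) (l : List (String × Int))
    (h : ∀ z ∈ l, x.2 < z.2) :
    PySem.List.insertBy (fun a b => decide (a.2 < b.2)) x l = x :: l := by
  cases l with
  | nil => rfl
  | cons y ys => simp [PySem.List.insertBy, h y (List.mem_cons_self ..)]

theorem pv_filter_insertBy (x : String × Int) (acc : List (String × Int)) (p : String × Int → Bool)
    (h : acc.Pairwise (fun a b => a.2 ≤ b.2)) :
    (PySem.List.insertBy (fun a b => decide (a.2 < b.2)) x acc).filter p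
      = if p x then PySem.List.insertBy (fun a b => decide (a.2 < b.2)) x (acc.filter p)
        else acc.filter p := by
  induction acc with
  | nil => by_cases hp : p x <;> simp [PySem.List.insertBy, hp]
  | cons y ys ih =>
    have hy : ∀ z ∈ ys, y.2 ≤ z.2 := (List.pairwise_cons.mp h).1
    have hys : ys.Pairwise (fun a b => a.2 ≤ b.2) := (List.pairwise_cons.mp h).2
    by_cases hxy : x.2 < y.2
    · simp only [PySem.List.insertBy, hxy, decide_true, if_true]
      by_cases hp : p x
      · by_cases hpy : p y
        · simp [List.filter_cons, hp, hpy, PySem.List.insertBy, hxy]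
        · simp only [List.filter_cons, hp, hpy, if_true, if_false, Bool.false_eq_true]
          rw [pv_insertBy_all_lt]
          intro z hz
          exact lt_of_lt_of_le hxy (hy z (List.mem_of_mem_filter hz))
      · simp [List.filter_cons, hp]
    · simp only [PySem.List.insertBy, hxy, decide_false, Bool.false_eq_true, if_false]
      by_cases hpy : p y
      · simp only [List.filter_cons, hpy, if_true]
        rw [ih hys]
        by_cases hp : p x
        · simp [hp, PySem.List.insertBy, hxy]
        · simp [hp]
      · simp only [List.filter_cons, hpy, Bool.false_eq_true, if_false]
        exact ih hys
  
theorem pv_sorted_append_singleton (xs : List (String × Int)) (x : String × Int) :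
    PySem.List.sorted (xs ++ [x]) (fun a => a.2) false
      = PySem.List.insertBy (fun a b => decide (a.2 < b.2)) x (PySem.List.sorted xs (fun a => a.2) false) := by
  simp [PySem.List.sorted, List.foldl_append]

theorem pv_filter_sorted (xs : List (String × Int)) (p : String × Int → Bool) :
    (PySem.List.sorted xs (fun a => a.2) false).filter p
      = PySem.List.sorted (xs.filter p) (fun a => a.2) false := by
  induction xs using List.reverseRecOn with
  | nil => rfl
  | append_singleton xs x ih =>
    rw [pv_sorted_append_singleton, pv_filter_insertBy _ _ _ (PySem.List.sorted_pairwise xs (fun a => a.2)),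
      List.filter_append]
    by_cases hp : p x
    · simp only [hp, if_true, List.filter_cons, List.filter_nil]
      rw [ih, ← pv_sorted_append_singleton]
    · simp [hp, ih]

-- keys of the spec-shaped dict
theorem pv_keys_assoc (ds : List (String × Int)) :
    PySem.Dict.keys (⟨pvAssoc ds⟩ : PySem.Dict String (List (String × Int))) = pvKeys ds := by
  simp [PySem.Dict.keys, pvAssoc, List.map_map, Function.comp_def]

theorem pv_nodup_keys (ds : List (String × Int)) : (pvKeys ds).Nodup :=
  PySem.Set.nodup_ofList _

-- ===== VERDICT (by name: the statement is the Claim_ definition above) =====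
theorem group_vocabulary_spec : Claim_equal_group_vocabulary := by
  intro vocab _
  unfold Spec_group_vocabulary group_vocabulary group_vocabulary_alt
  dsimp only
  set ds := (PySem.Dict.ofList vocab).items with hds
  -- rewrite A's per-item body to a modify at pvCategory
  have hfun : (fun (grouped : PySem.Dict String (List (String × Int))) (ti : String × Int) =>
      let r := pvCATEGORIES.foldl
        (fun (st : PySem.Dict String (List (String × Int)) × Bool) cat =>
          if st.2 then st
          else if PySem.Str.startswith ti.1 cat then (st.1.modify cat [] (fun l => l ++ [ti]), true)
          else st) (grouped, false)
      if r.2 then r.1 else r.1.modify "OTHER" [] (fun l => l ++ [ti]))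
      = fun g ti => PySem.Dict.modify g (pvCategory ti.1) [] (fun l => l ++ [ti]) := by
    funext g ti; exact pv_inner_loop g ti
  rw [hfun]
  have hempty : (PySem.Dict.empty : PySem.Dict String (List (String × Int))) = ⟨pvAssoc []⟩ := rfl
  rw [hempty, pv_foldA ds [], List.nil_append, pv_keys_assoc]
  -- B's key-collecting pass
  have hB1 : ds.foldl (fun g ti => PySem.Dict.setdefault g (pvCategory ti.1) []) ⟨pvAssoc []⟩
      = ⟨(pvKeys ds).map (fun k => (k, ([] : List (String × Int))))⟩ := by
    simpa using pv_foldB1 ds []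
  rw [hB1]
  -- B's filling pass
  have hcover : ∀ ti ∈ PySem.List.sorted ds (fun x => x.2) false, pvCategory ti.1 ∈ pvKeys ds := by
    intro ti hti
    rw [PySem.List.mem_sorted] at hti
    unfold pvKeys
    rw [PySem.Set.mem_ofList]
    exact List.mem_map_of_mem hti
  rw [pv_foldB2 _ _ _ hcover]
  -- A's per-bucket sorting pass
  have hA := pv_foldSort (pvKeys ds) (pvKeys ds) (fun k => pvBucket ds k) (pv_nodup_keys ds) (fun k hk => hk)
  beta_reduce at hA
  unfold pvAssoc
  rw [hA]
  congr 1
  congr 1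
  apply List.map_congr_left
  intro k hk
  rw [if_pos hk, List.nil_append, pv_filter_sorted]
  rfl
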